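-- pv_equiv track=rewrite | github.com/sese7414/coding-test-practice | python/33_count_add_fractions.py | solution
-- ===== SOURCE A (Python) =====
-- import math
-- import math
--
-- def solution(left, right):
--     answer = 0
--     for i in range(left, right + 1):
--         cnt = 0
--         for j in range(1, int(math.sqrt(i)) + 1):
--             if j*j == i:
--                 cnt += 1
--             elif i % j == 0:
--                 cnt += 2
--
--         if cnt % 2 == 0:
--             answer += i
--         else:
--             answer -= i
--     return answer
-- ===== SOURCE B (Python) =====
-- import math
--
-- def solution(left, right):
--     if left > right:
--         return 0
--     total = (left + right) * (right - left + 1) // 2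
--     lo = 0 if left <= 0 else math.isqrt(left - 1) + 1
--     hi = math.isqrt(right) if right >= 0 else -1
--     return total - 2 * sum(k * k for k in range(lo, hi + 1))
-- ===== Notes on version B (the rewrite author's own statement) =====
-- stated objective: alternative
-- what changed: B replaces A's per-integer trial-division divisor-parity loop by a closed-form arithmetic-series total minus twice the sum of the perfect squares in the range, enumerated by their integer roots via math.isqrt.
-- crash fix: On a non-empty range whose start is negative A raises ValueError (math.sqrt of a negative number); B returns the sum with every negative number counted as a non-square (added). — e.g. on solution(-1, 0): A raises ValueError, B returns -1
import Mathlib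
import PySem

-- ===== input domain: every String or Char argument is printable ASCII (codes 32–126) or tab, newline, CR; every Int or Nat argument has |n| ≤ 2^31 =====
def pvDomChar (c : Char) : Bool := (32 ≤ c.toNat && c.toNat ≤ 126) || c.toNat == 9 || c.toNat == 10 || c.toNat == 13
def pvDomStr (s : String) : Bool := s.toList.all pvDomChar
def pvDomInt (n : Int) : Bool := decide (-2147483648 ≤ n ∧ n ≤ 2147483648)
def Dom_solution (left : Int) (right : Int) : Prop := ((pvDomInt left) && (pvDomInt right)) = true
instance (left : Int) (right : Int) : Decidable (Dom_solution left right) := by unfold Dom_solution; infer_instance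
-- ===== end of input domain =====

-- B replaces A's per-integer divisor-counting loop by a closed-form range sum minus twice the
-- sum of the perfect squares in the range (enumerated by their roots) — objective: alternative.

-- ===== PORT A =====
-- int(math.sqrt(i)) equals Nat.sqrt i.toNat exactly for 0 ≤ i ≤ 2^31 (double sqrt is exact
-- enough there); for i < 0 Python raises ValueError — those inputs are outside Pre_solution.
def solution (left : Int) (right : Int) : Int :=
  (PySem.List.pyRange left (right + 1) 1).foldl (fun answer i =>
    let cnt : Int :=
      (PySem.List.pyRange 1 ((Nat.sqrt i.toNat : Int) + 1) 1).foldl (fun cnt j =>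
        if j * j == i then cnt + 1
        else if PySem.Int.mod i j == 0 then cnt + 2
        else cnt) 0
    if PySem.Int.mod cnt 2 == 0 then answer + i else answer - i) 0

-- ===== PORT B =====
-- math.isqrt → Nat.sqrt ∘ Int.toNat (arguments are ≥ 0 where B calls it)
def solution_alt (left : Int) (right : Int) : Int :=
  if left > right then 0
  else
    let total := PySem.Int.floordiv ((left + right) * (right - left + 1)) 2
    let lo : Int := if left ≤ 0 then 0 else (Nat.sqrt (left - 1).toNat : Int) + 1
    let hi : Int := if 0 ≤ right then (Nat.sqrt right.toNat : Int) else -1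
    total - 2 * (PySem.List.pyRange lo (hi + 1) 1).foldl (fun s k => s + k * k) 0

-- ===== PRECONDITION & SPEC =====
-- Pre_ excludes exactly the inputs where A raises: a non-empty range starting below 0
-- (math.sqrt of a negative number raises ValueError).
def Pre_solution (left : Int) (right : Int) : Prop := right < left ∨ 0 ≤ left
instance (left : Int) (right : Int) : Decidable (Pre_solution left right) := by
  unfold Pre_solution; infer_instance
def pvWitness_solution : Int × Int := (0, 10)

-- On a non-empty range containing a negative number A raises ValueError (math.sqrt of a
-- negative); B returns the sum with every negative number counted as a non-square.
def Raises_solution (left : Int) (right : Int) : Prop := left ≤ right ∧ left < 0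
instance (left : Int) (right : Int) : Decidable (Raises_solution left right) := by
  unfold Raises_solution; infer_instance
def pvRaiseWitness_solution : Int × Int := (-1, 0)
def pvRaiseWitnessOut_solution : Int := -1

def Spec_solution (left : Int) (right : Int) (out : Int) : Prop := out = solution_alt left right
instance (left : Int) (right : Int) (out : Int) : Decidable (Spec_solution left right out) := by
  unfold Spec_solution; infer_instance

-- ===== CLAIM (what is proved, stated in full; the proofs are below) =====
def Claim_equal_solution : Prop := ∀ (left : Int) (right : Int), Dom_solution left right → Pre_solution left right → Spec_solution left right (solution left right)
def Claim_raises_solution : Prop := (∀ (left : Int) (right : Int), Dom_solution left right → Raises_solution left right → ¬ Pre_solution left right) ∧ (Dom_solution (pvRaiseWitness_solution.1) (pvRaiseWitness_solution.2) ∧ Raises_solution (pvRaiseWitness_solution.1) (pvRaiseWitness_solution.2) ∧ solution_alt (pvRaiseWitness_solution.1) (pvRaiseWitness_solution.2) = pvRaiseWitnessOut_solution)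

-- ===== LEMMAS AND PROOFS =====

-- i is a nonnegative perfect square
def sqB (i : Int) : Bool := decide (0 ≤ i) && (Nat.sqrt i.toNat * Nat.sqrt i.toNat == i.toNat)

-- the per-element contribution A computes
def fsq (i : Int) : Int := if sqB i then -i else i

theorem sqB_iff (i : Int) : sqB i = true ↔ ∃ k : Int, 0 ≤ k ∧ k * k = i := by
  unfold sqB
  simp only [Bool.and_eq_true, decide_eq_true_eq, beq_iff_eq]
  constructor
  · rintro ⟨h0, hs⟩
    refine ⟨(Nat.sqrt i.toNat : Int), by positivity, ?_⟩
    omega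
  · rintro ⟨k, hk, hkk⟩
    have h0 : 0 ≤ i := by nlinarith
    have hk' : k = (k.toNat : Int) := (Int.toNat_of_nonneg hk).symm
    have ht : i.toNat = k.toNat * k.toNat := by
      have h2 : ((k.toNat * k.toNat : Nat) : Int) = i := by push_cast; rw [← hk']; exact hkk
      omega
    rw [ht]
    simp [show k.toNat * k.toNat = k.toNat ^ 2 by ring, Nat.sqrt_eq']
    exact h0

theorem cnt_parity_aux (i : Int) (n : Nat) :
    ((PySem.List.pyRange 1 ((n : Int) + 1) 1).foldl (fun cnt j =>
        if j * j == i then cnt + 1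
        else if PySem.Int.mod i j == 0 then cnt + 2
        else cnt) (0 : Int)) % 2
      = if (PySem.List.pyRange 1 ((n : Int) + 1) 1).any (fun j => j * j == i) then 1 else 0 := by
  induction n with
  | zero =>
    rw [PySem.List.pyRange_one_eq_nil (by norm_num)]
    simp
  | succ m ih =>
    have hsplit : PySem.List.pyRange 1 (((m + 1 : Nat) : Int) + 1) 1
        = PySem.List.pyRange 1 ((m : Int) + 1) 1 ++ [(m : Int) + 1] := by
      have := PySem.List.pyRange_one_succ_right (a := 1) (b := (m : Int) + 1) (by omega)
      rw [← this]
      norm_num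
    rw [hsplit, List.foldl_append, List.any_append]
    simp only [List.foldl_cons, List.foldl_nil, List.any_cons, List.any_nil, Bool.or_false]
    cases hB : (((m : Int) + 1) * ((m : Int) + 1) == i) with
    | true =>
      have hx : ((m : Int) + 1) * ((m : Int) + 1) = i := by exact beq_iff_eq.mp hB
      have hA : (PySem.List.pyRange 1 ((m : Int) + 1) 1).any (fun j => j * j == i) = false := by
        rw [List.any_eq_false]
        intro j hj
        have hmem := (PySem.List.mem_pyRange_one).mp hj
        simp only [beq_iff_eq]
        intro hji
        nlinarith [hmem.1, hmem.2]
      simp only [hA, Bool.false_or, Bool.false_eq_true, if_false, if_true] at ih ⊢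
      omega
    | false =>
      simp only [hB, Bool.or_false] at *
      cases hC : (PySem.Int.mod i ((m : Int) + 1) == 0) with
      | true =>
        simp only [Bool.false_eq_true, if_false, if_true] at ih ⊢
        split_ifs at ih ⊢ <;> omega
      | false =>
        simp only [Bool.false_eq_true, if_false] at ih ⊢
        split_ifs at ih ⊢ <;> omega

theorem cnt_parity (i : Int) (hi : 0 < i) :
    ((PySem.List.pyRange 1 ((Nat.sqrt i.toNat : Int) + 1) 1).foldl (fun cnt j =>
        if j * j == i then cnt + 1
        else if PySem.Int.mod i j == 0 then cnt + 2
        else cnt) (0 : Int)) % 2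
      = if sqB i then 1 else 0 := by
  rw [cnt_parity_aux i (Nat.sqrt i.toNat)]
  have hEq : (PySem.List.pyRange 1 ((Nat.sqrt i.toNat : Int) + 1) 1).any (fun j => j * j == i)
      = sqB i := by
    cases hs : sqB i with
    | true =>
      have h := (sqB_iff i).mp hs
      unfold sqB at hs
      simp only [Bool.and_eq_true, decide_eq_true_eq, beq_iff_eq] at hs
      rw [List.any_eq_true]
      refine ⟨(Nat.sqrt i.toNat : Int), ?_, ?_⟩
      · rw [PySem.List.mem_pyRange_one]
        have hp : 0 < Nat.sqrt i.toNat := Nat.sqrt_pos.mpr (by omega)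
        omega
      · simp only [beq_iff_eq]
        omega
    | false =>
      rw [List.any_eq_false]
      intro j hj
      have hmem := (PySem.List.mem_pyRange_one).mp hj
      simp only [beq_iff_eq]
      intro hji
      have : sqB i = true := (sqB_iff i).mpr ⟨j, by omega, hji⟩
      rw [hs] at this
      exact Bool.noConfusion this
  rw [hEq]

theorem A_char (left right : Int) (h : 0 ≤ left) :
    solution left right = ((PySem.List.pyRange left (right + 1) 1).map fsq).sum := by
  unfold solution
  rw [PySem.List.foldl_congr_mem (g := fun a i => a + fsq i)]
  · rw [PySem.List.foldl_add]
    simp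
  · intro acc x hx
    have hmem := (PySem.List.mem_pyRange_one).mp hx
    have hx0 : 0 ≤ x := by omega
    dsimp only
    rw [PySem.Int.mod_eq_emod_of_pos (by norm_num)]
    rcases eq_or_lt_of_le hx0 with h0 | hpos
    · subst h0
      norm_num [fsq, sqB, Nat.sqrt_zero, PySem.List.pyRange_one_eq_nil (le_refl (1:Int))]
    · rw [cnt_parity x hpos]
      unfold fsq
      cases hs : sqB x with
      | true => simp; ring
      | false => simp

theorem two_mul_sum_range (a : Int) (n : Nat) :
    2 * (((List.range n).map (fun k : Nat => a + (k : Int))).sum) = n * (2 * a + n - 1) := by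
  induction n with
  | zero => simp
  | succ m ih =>
    rw [List.range_succ, List.map_append, List.sum_append]
    push_cast
    push_cast at ih
    simp only [List.map_cons, List.map_nil, List.sum_cons, List.sum_nil]
    ring_nf
    ring_nf at ih
    linarith

theorem sum_map_sub (l : List Int) (g h : Int → Int) :
    (l.map (fun x => g x - h x)).sum = (l.map g).sum - (l.map h).sum := by
  induction l with
  | nil => simp
  | cons x xs ih => simp [ih]; ring

theorem sum_map_ite_two (l : List Int) :
    (l.map (fun i => if sqB i then 2 * i else 0)).sum = 2 * (l.filter sqB).sum := by
  induction l with
  | nil => simp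
  | cons x xs ih =>
    by_cases h : sqB x = true
    · simp [h, ih]
      ring
    · simp [h, ih]

theorem filter_sq_eq (left right : Int) (h0 : 0 ≤ left) (h1 : left ≤ right) :
    (PySem.List.pyRange left (right + 1) 1).filter sqB
      = (PySem.List.pyRange (if left ≤ 0 then (0:Int) else (Nat.sqrt (left - 1).toNat : Int) + 1)
          ((if 0 ≤ right then (Nat.sqrt right.toNat : Int) else -1) + 1) 1).map (fun k => k * k) := by
  have hr0 : 0 ≤ right := le_trans h0 h1
  rw [if_pos hr0]
  set t : Int := if left ≤ 0 then (0 : Int) else (Nat.sqrt (left - 1).toNat : Int) + 1 with ht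
  have hlo0 : 0 ≤ t := by rw [ht]; split_ifs <;> positivity
  have hpL : ((PySem.List.pyRange left (right + 1) 1).filter sqB).Pairwise (· < ·) :=
    List.Pairwise.sublist List.filter_sublist (PySem.List.pairwise_lt_pyRange_one _ _)
  have hpR : ((PySem.List.pyRange t ((Nat.sqrt right.toNat : Int) + 1) 1).map
      (fun k => k * k)).Pairwise (· < ·) := by
    rw [List.pairwise_map]
    refine List.Pairwise.imp_of_mem ?_ (PySem.List.pairwise_lt_pyRange_one _ _)
    intro a b ha hb hab
    have hma := (PySem.List.mem_pyRange_one).mp ha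
    nlinarith [hlo0, hma.1]
  have hmem : ∀ x : Int, x ∈ (PySem.List.pyRange left (right + 1) 1).filter sqB ↔
      x ∈ (PySem.List.pyRange t ((Nat.sqrt right.toNat : Int) + 1) 1).map (fun k => k * k) := by
    intro x
    rw [List.mem_filter, List.mem_map]
    constructor
    · rintro ⟨hxr, hsq⟩
      have hxm := (PySem.List.mem_pyRange_one).mp hxr
      unfold sqB at hsq
      simp only [Bool.and_eq_true, decide_eq_true_eq, beq_iff_eq] at hsq
      obtain ⟨hx0, hroot⟩ := hsq
      refine ⟨(Nat.sqrt x.toNat : Int), ?_, ?_⟩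
      · rw [PySem.List.mem_pyRange_one]
        constructor
        · rw [ht]; split_ifs with hl
          · positivity
          · have hstep : (left - 1).toNat.sqrt < x.toNat.sqrt := by
              by_contra hc
              rw [not_lt] at hc
              have h2 : x.toNat.sqrt * x.toNat.sqrt ≤ (left - 1).toNat.sqrt * (left - 1).toNat.sqrt :=
                Nat.mul_le_mul hc hc
              have h3 := Nat.sqrt_le (left - 1).toNat
              have h4 : x.toNat ≤ (left - 1).toNat := by
                calc x.toNat = x.toNat.sqrt * x.toNat.sqrt := hroot.symm
                  _ ≤ (left - 1).toNat.sqrt * (left - 1).toNat.sqrt := h2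
                  _ ≤ (left - 1).toNat := h3
              omega
            omega
        · have h5 : x.toNat.sqrt ≤ right.toNat.sqrt := Nat.sqrt_le_sqrt (by omega)
          omega
      · have h6 : ((x.toNat.sqrt * x.toNat.sqrt : Nat) : Int) = x := by rw [hroot]; omega
        push_cast at h6
        exact h6
    · rintro ⟨k, hk, rfl⟩
      have hkm := (PySem.List.mem_pyRange_one).mp hk
      have hk0 : 0 ≤ k := le_trans hlo0 hkm.1
      have hcast : ((k.toNat * k.toNat : Nat) : Int) = k * k := by
        push_cast [Int.toNat_of_nonneg hk0]; ring
      refine ⟨?_, (sqB_iff _).mpr ⟨k, hk0, rfl⟩⟩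
      rw [PySem.List.mem_pyRange_one]
      constructor
      · rw [ht] at hkm
        rcases hkm with ⟨hkl, _⟩
        by_cases hl : left ≤ 0
        · rw [if_pos hl] at hkl
          nlinarith
        · rw [if_neg hl] at hkl
          have h5 : (left - 1).toNat.sqrt < k.toNat := by omega
          have h6 : (left - 1).toNat < k.toNat * k.toNat := Nat.sqrt_lt.mp h5
          have h9 : (left : Int) - 1 < ((k.toNat * k.toNat : Nat) : Int) := by
            have : ((left - 1).toNat : Int) = left - 1 := by omega
            omega
          rw [hcast] at h9
          linarith
      · have h5 : k.toNat ≤ right.toNat.sqrt := by omega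
        have h6 : k.toNat * k.toNat ≤ right.toNat := Nat.le_sqrt.mp h5
        have h9 : ((k.toNat * k.toNat : Nat) : Int) ≤ right := by omega
        rw [hcast] at h9
        linarith
  exact List.Perm.eq_of_pairwise' (hpL.imp le_of_lt) (hpR.imp le_of_lt)
    ((List.perm_ext_iff_of_nodup (hpL.imp ne_of_lt) (hpR.imp ne_of_lt)).mpr hmem)

-- ===== VERDICT (by name: the statement is the Claim_ definition above) =====
theorem map_fsq_sum (l : List Int) :
    (l.map fsq).sum = (l.map (fun x => x)).sum - (l.map (fun i => if sqB i then 2 * i else 0)).sum := by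
  rw [← sum_map_sub]
  congr 1
  apply List.map_congr_left
  intro x _
  unfold fsq
  split_ifs <;> ring

theorem total_eq (left right : Int) (h1 : left ≤ right) :
    PySem.Int.floordiv ((left + right) * (right - left + 1)) 2
      = ((PySem.List.pyRange left (right + 1) 1).map (fun x => x)).sum := by
  rw [PySem.List.pyRange_one]
  set n := ((right + 1) - left).toNat with hn
  have h2 := two_mul_sum_range left n
  have hncast : (n : Int) = right + 1 - left := by omega
  have hprod : (left + right) * (right - left + 1)
      = 2 * (((List.range n).map (fun k : Nat => left + (k : Int))).sum) := by
    rw [h2, hncast]; ring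
  rw [List.map_map, hprod, PySem.Int.floordiv_eq_ediv_of_pos (by norm_num),
    Int.mul_ediv_cancel_left _ (by norm_num)]
  rfl

theorem solution_spec : Claim_equal_solution := by
  unfold Claim_equal_solution Spec_solution Pre_solution
  intro left right _ hpre
  by_cases hlt : right < left
  · unfold solution solution_alt
    rw [if_pos (by omega : left > right), PySem.List.pyRange_one_eq_nil (by omega)]
    simp
  · have h0 : 0 ≤ left := by rcases hpre with h | h <;> omega
    have h1 : left ≤ right := by omega
    rw [A_char left right h0]
    unfold solution_alt
    rw [if_neg (by omega)]
    dsimp only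
    rw [PySem.List.foldl_add (g := fun k => k * k), map_fsq_sum, ← total_eq left right h1,
      sum_map_ite_two, filter_sq_eq left right h0 h1]
    ring

@[simp]
theorem solution_raises : Claim_raises_solution := by
  unfold Claim_raises_solution
  exact ⟨by intro l r _ hr; unfold Raises_solution Pre_solution at *; omega, by decide⟩
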